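-- pv_equiv track=rewrite | github.com/dubugging/251 | 7. Mixed Questions/sub_square_size_k.py | sumOfKxKMatrices
-- ===== SOURCE A (Python) =====
-- def sumOfKxKMatrices(arr: list, k: int):
--     n = len(arr)
--     ans = [[0 for i in range(n-k+1)] for j in range(n-k+1)]
--
--     for i in range(n-k+1):
--         for j in range(n-k+1):
--             sm = 0
--             for x in range(k):
--                 for y in range(k):
--                     sm += arr[x + i][y + j]
--             ans[i][j] = sm
--     return ans
-- ===== SOURCE B (Python) =====
-- def sumOfKxKMatrices(arr: list, k: int):
--     n = len(arr)
--     # P[i][j] = sum of arr[x][y] for x < i, y < j  (an "integral image")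
--     P = [[0] * (n + 1)]
--     for row in arr:
--         prev = P[-1]
--         cur = [0]
--         s = 0
--         for j in range(n):
--             s += row[j]
--             cur.append(prev[j + 1] + s)
--         P.append(cur)
--     m = n - k + 1
--     return [[P[i + k][j + k] - P[i][j + k] - P[i + k][j] + P[i][j]
--              for j in range(m)] for i in range(m)]
-- ===== Notes on version B (the rewrite author's own statement) =====
-- stated objective: alternative
-- what changed: Replaced the quadruple loop (recomputing each KxK window from scratch) by a 2D prefix-sum (integral image) table built once, so each window sum is four table lookups.
-- outside the precondition, e.g. on sumOfKxKMatrices([[1], [2, 3]], 4): A returns [], B raises IndexError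
import Mathlib
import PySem

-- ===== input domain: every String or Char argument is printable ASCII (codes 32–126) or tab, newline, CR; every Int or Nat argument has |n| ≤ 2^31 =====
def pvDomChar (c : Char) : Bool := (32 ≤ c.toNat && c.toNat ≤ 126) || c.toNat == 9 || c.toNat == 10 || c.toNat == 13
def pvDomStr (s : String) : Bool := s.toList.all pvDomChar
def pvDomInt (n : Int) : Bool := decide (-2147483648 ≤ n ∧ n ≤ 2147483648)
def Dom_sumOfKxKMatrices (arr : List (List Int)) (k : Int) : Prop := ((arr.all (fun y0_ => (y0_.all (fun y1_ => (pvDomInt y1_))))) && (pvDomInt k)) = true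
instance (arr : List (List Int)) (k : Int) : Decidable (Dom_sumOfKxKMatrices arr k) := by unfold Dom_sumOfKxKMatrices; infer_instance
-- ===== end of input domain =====

-- B replaces A's quadruple loop by a 2D prefix-sum (integral image) table built once,
-- so each KxK window sum is four table lookups (objective: alternative algorithm).


-- ===== PORT A =====
-- literal quadruple-loop transliteration; 'ans[i][j] = sm' on the fresh zero matrix
-- assigns each cell exactly once, so the matrix is built as nested maps of the cell value.
def sumOfKxKMatrices (arr : List (List Int)) (k : Int) : List (List Int) :=
  let n : Int := (arr.length : Int)
  (PySem.List.pyRange 0 (n - k + 1) 1).map (fun i =>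
    (PySem.List.pyRange 0 (n - k + 1) 1).map (fun j =>
      (PySem.List.pyRange 0 k 1).foldl (fun sm x =>
        (PySem.List.pyRange 0 k 1).foldl (fun sm2 y =>
          sm2 + PySem.List.pyGetD (PySem.List.pyGetD arr (x + i) []) (y + j) 0) sm) 0))

-- ===== PORT B =====
-- the inner 'for j in range(n)' loop of Source B: state is (cur, s) — cur grows by one
-- entry prev[j+1] + s per step, s is the running row sum
def pvPrefRow (n : Int) (prev row : List Int) : List Int :=
  ((PySem.List.pyRange 0 n 1).foldl (fun (st : List Int × Int) j =>
      let s := st.2 + PySem.List.pyGetD row j 0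
      (st.1 ++ [PySem.List.pyGetD prev (j + 1) 0 + s], s)) ([0], 0)).1

def sumOfKxKMatrices_alt (arr : List (List Int)) (k : Int) : List (List Int) :=
  let n : Int := (arr.length : Int)
  let P := arr.foldl (fun P row => P ++ [pvPrefRow n (PySem.List.pyGetD P (-1) []) row])
             [List.replicate (arr.length + 1) 0]
  let m := n - k + 1
  (PySem.List.pyRange 0 m 1).map (fun i =>
    (PySem.List.pyRange 0 m 1).map (fun j =>
      PySem.List.pyGetD (PySem.List.pyGetD P (i + k) []) (j + k) 0
      - PySem.List.pyGetD (PySem.List.pyGetD P i []) (j + k) 0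
      - PySem.List.pyGetD (PySem.List.pyGetD P (i + k) []) j 0
      + PySem.List.pyGetD (PySem.List.pyGetD P i []) j 0))

-- ===== PRECONDITION & SPEC =====
-- Pre_ excludes k < 0 (a meaningless window size, on which A returns an (n-k+1)^2 zero
-- matrix while B raises IndexError) and ragged arrays with a row shorter than len(arr)
-- (on which A raises IndexError whenever a window reads the short row, and B always raises).
def Pre_sumOfKxKMatrices (arr : List (List Int)) (k : Int) : Prop :=
  0 ≤ k ∧ ∀ row ∈ arr, arr.length ≤ row.length
instance (arr : List (List Int)) (k : Int) : Decidable (Pre_sumOfKxKMatrices arr k) := by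
  unfold Pre_sumOfKxKMatrices; infer_instance
def pvWitness_sumOfKxKMatrices : List (List Int) × Int := ([[1, 2], [3, 4]], 1)

def Spec_sumOfKxKMatrices (arr : List (List Int)) (k : Int) (out : List (List Int)) : Prop := out = sumOfKxKMatrices_alt arr k
instance (arr : List (List Int)) (k : Int) (out : List (List Int)) : Decidable (Spec_sumOfKxKMatrices arr k out) := by unfold Spec_sumOfKxKMatrices; infer_instance

-- ===== CLAIM (what is proved, stated in full; the proofs are below) =====
def Claim_equal_sumOfKxKMatrices : Prop := ∀ (arr : List (List Int)) (k : Int), Dom_sumOfKxKMatrices arr k → Pre_sumOfKxKMatrices arr k → Spec_sumOfKxKMatrices arr k (sumOfKxKMatrices arr k)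

-- ===== LEMMAS AND PROOFS =====

-- cell (x,y) of arr, 0 outside; the common value both ports sum
def pvCell (arr : List (List Int)) (x y : Nat) : Int := (arr.getD x []).getD y 0

-- 2D prefix sum: sum of all cells (x,y) with x < a, y < b
def pvS (arr : List (List Int)) (a b : Nat) : Int :=
  ∑ x ∈ Finset.range a, ∑ y ∈ Finset.range b, pvCell arr x y

-- row a of the mathematical integral image
def pvProw (arr : List (List Int)) (a : Nat) : List Int :=
  (List.range (arr.length + 1)).map (fun b => pvS arr a b)

-- the inner loop of pvPrefRow: final state is (the finished row, the full row sum)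
lemma pvPrefRow_aux (n : Nat) (prev row : List Int) :
    ((PySem.List.pyRange 0 (n : Int) 1).foldl (fun (st : List Int × Int) j =>
      let s := st.2 + PySem.List.pyGetD row j 0
      (st.1 ++ [PySem.List.pyGetD prev (j + 1) 0 + s], s)) ([0], 0))
    = (0 :: (List.range n).map (fun j =>
          prev.getD (j + 1) 0 + ∑ y ∈ Finset.range (j + 1), row.getD y 0),
       ∑ y ∈ Finset.range n, row.getD y 0) := by
  rw [PySem.List.pyRange_zero_nat]
  induction n with
  | zero => simp
  | succ t ih =>
    rw [List.range_succ, List.map_append, List.foldl_append, ih]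
    simp only [List.map_cons, List.map_nil, List.foldl_cons, List.foldl_nil]
    have h1 : PySem.List.pyGetD row (t : Int) 0 = row.getD t 0 := PySem.List.pyGetD_natCast ..
    have h2 : PySem.List.pyGetD prev ((t : Int) + 1) 0 = prev.getD (t + 1) 0 := by
      have : ((t : Int) + 1) = ((t + 1 : Nat) : Int) := by push_cast; ring
      rw [this, PySem.List.pyGetD_natCast]
    simp only [h1, h2, Finset.sum_range_succ, List.map_append, List.map_cons, List.map_nil]
    constructor

lemma pvPrefRow_eq (n : Nat) (prev row : List Int) :
    pvPrefRow (n : Int) prev row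
      = 0 :: (List.range n).map (fun j =>
          prev.getD (j + 1) 0 + ∑ y ∈ Finset.range (j + 1), row.getD y 0) := by
  unfold pvPrefRow
  rw [pvPrefRow_aux]

-- extending the integral image by one source row
lemma pvProw_step (arr : List (List Int)) (t : Nat) :
    pvPrefRow (arr.length : Int) (pvProw arr t) (arr.getD t []) = pvProw arr (t + 1) := by
  rw [pvPrefRow_eq]
  conv_rhs => rw [pvProw, List.range_succ_eq_map, List.map_cons, List.map_map]
  have h0 : pvS arr (t + 1) 0 = 0 := by simp [pvS]
  rw [h0]
  congr 1
  refine List.map_congr_left (fun j hj => ?_)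
  have hj' : j < arr.length := List.mem_range.mp hj
  have hg : (pvProw arr t).getD (j + 1) 0 = pvS arr t (j + 1) := by
    unfold pvProw
    exact PySem.List.getD_map_range _ _ _ _ (by omega)
  rw [hg]
  show pvS arr t (j + 1) + ∑ y ∈ Finset.range (j + 1), pvCell arr t y = pvS arr (t + 1) (j + 1)
  simp [pvS, Finset.sum_range_succ]

-- invariant of the outer fold of B: after t rows, P holds integral-image rows 0..t
lemma pvBuildP (arr : List (List Int)) (t : Nat) (ht : t ≤ arr.length) :
    (arr.take t).foldl
        (fun P row => P ++ [pvPrefRow (arr.length : Int) (PySem.List.pyGetD P (-1) []) row])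
        [List.replicate (arr.length + 1) 0]
      = (List.range (t + 1)).map (pvProw arr) := by
  induction t with
  | zero =>
    simp only [List.take_zero, List.foldl_nil]
    congr 1
    unfold pvProw
    refine List.ext_getElem (by simp) (fun i h1 h2 => ?_)
    simp [pvS, pvCell]
  | succ t ih =>
    have ht' : t < arr.length := by omega
    rw [List.take_add_one, List.foldl_append, ih (by omega)]
    have harr : arr[t]? = some (arr.getD t []) := by
      rw [List.getD_eq_getElem?_getD, List.getElem?_eq_getElem ht']
      simp
    rw [harr]
    simp only [Option.toList, List.foldl_cons, List.foldl_nil]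
    have hsplit : (List.range (t + 1)).map (pvProw arr)
        = (List.range t).map (pvProw arr) ++ [pvProw arr t] := by
      rw [List.range_succ, List.map_append, List.map_cons, List.map_nil]
    rw [hsplit, PySem.List.pyGetD_neg_one_append_singleton, pvProw_step]
    rw [show t + 1 + 1 = (t + 1) + 1 from rfl, List.range_succ, List.map_append, hsplit]
    simp

-- four-corner prefix difference = the KxK window sum (pure Finset algebra)
lemma pvEntry_eq (arr : List (List Int)) (i j k : Nat) :
    pvS arr (i + k) (j + k) - pvS arr i (j + k) - pvS arr (i + k) j + pvS arr i j
      = ∑ x ∈ Finset.range k, ∑ y ∈ Finset.range k, pvCell arr (x + i) (y + j) := by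
  have hcol : ∀ b, pvS arr (i + k) b - pvS arr i b
      = ∑ x ∈ Finset.Ico i (i + k), ∑ y ∈ Finset.range b, pvCell arr x y := by
    intro b
    rw [Finset.sum_Ico_eq_sub _ (Nat.le_add_right i k)]
    rfl
  have h : pvS arr (i + k) (j + k) - pvS arr i (j + k) - (pvS arr (i + k) j - pvS arr i j)
      = ∑ x ∈ Finset.Ico i (i + k), ∑ y ∈ Finset.Ico j (j + k), pvCell arr x y := by
    rw [hcol, hcol, ← Finset.sum_sub_distrib]
    refine Finset.sum_congr rfl (fun x _ => ?_)
    rw [Finset.sum_Ico_eq_sub _ (Nat.le_add_right j k)]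
  have h2 : pvS arr (i + k) (j + k) - pvS arr i (j + k) - pvS arr (i + k) j + pvS arr i j
      = pvS arr (i + k) (j + k) - pvS arr i (j + k) - (pvS arr (i + k) j - pvS arr i j) := by ring
  rw [h2, h, Finset.sum_Ico_eq_sum_range]
  simp only [Nat.add_sub_cancel_left]
  refine Finset.sum_congr rfl (fun x _ => ?_)
  rw [Finset.sum_Ico_eq_sum_range]
  simp only [Nat.add_sub_cancel_left]
  refine Finset.sum_congr rfl (fun y _ => ?_)
  rw [Nat.add_comm i x, Nat.add_comm j y]

lemma pvMain (arr : List (List Int)) (k : Int) (hk : 0 ≤ k) :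
    sumOfKxKMatrices arr k = sumOfKxKMatrices_alt arr k := by
  have hP : arr.foldl
        (fun P row => P ++ [pvPrefRow (arr.length : Int) (PySem.List.pyGetD P (-1) []) row])
        [List.replicate (arr.length + 1) 0]
      = (List.range (arr.length + 1)).map (pvProw arr) := by
    have := pvBuildP arr arr.length le_rfl
    rwa [List.take_length] at this
  simp only [sumOfKxKMatrices, sumOfKxKMatrices_alt, hP]
  refine List.map_congr_left (fun i hi => ?_)
  refine List.map_congr_left (fun j hj => ?_)
  rw [PySem.List.mem_pyRange_one] at hi hj
  obtain ⟨i', rfl⟩ : ∃ i' : Nat, i = (i' : Int) := ⟨i.toNat, by omega⟩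
  obtain ⟨j', rfl⟩ : ∃ j' : Nat, j = (j' : Int) := ⟨j.toNat, by omega⟩
  obtain ⟨k', rfl⟩ : ∃ k' : Nat, k = (k' : Int) := ⟨k.toNat, by omega⟩
  have hik : i' + k' ≤ arr.length := by omega
  have hjk : j' + k' ≤ arr.length := by omega
  -- B side: the four table lookups are pvS values
  have hrow : ∀ a : Nat, a ≤ arr.length →
      PySem.List.pyGetD ((List.range (arr.length + 1)).map (pvProw arr)) (a : Int) []
        = pvProw arr a := by
    intro a ha
    rw [PySem.List.pyGetD_natCast]
    exact PySem.List.getD_map_range _ _ _ _ (by omega)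
  have hS : ∀ a b : Nat, a ≤ arr.length → b ≤ arr.length →
      PySem.List.pyGetD (PySem.List.pyGetD
          ((List.range (arr.length + 1)).map (pvProw arr)) (a : Int) []) (b : Int) 0
        = pvS arr a b := by
    intro a b ha hb
    rw [hrow a ha, pvProw, PySem.List.pyGetD_natCast]
    exact PySem.List.getD_map_range _ _ _ _ (by omega)
  have hcast1 : (i' : Int) + (k' : Int) = ((i' + k' : Nat) : Int) := by push_cast; ring
  have hcast2 : (j' : Int) + (k' : Int) = ((j' + k' : Nat) : Int) := by push_cast; ring
  rw [hcast1, hcast2, hS _ _ hik hjk, hS _ _ (by omega) hjk, hS _ _ hik (by omega),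
      hS _ _ (by omega) (by omega)]
  -- A side: the two folds are the double window sum
  simp only [PySem.List.foldl_add]
  rw [PySem.List.pyRange_zero_nat k']
  have hterm : ∀ x y : Nat,
      PySem.List.pyGetD (PySem.List.pyGetD arr ((x : Int) + (i' : Int)) []) ((y : Int) + (j' : Int)) 0
        = pvCell arr (x + i') (y + j') := by
    intro x y
    have c1 : (x : Int) + (i' : Int) = ((x + i' : Nat) : Int) := by push_cast; ring
    have c2 : (y : Int) + (j' : Int) = ((y + j' : Nat) : Int) := by push_cast; ring
    rw [c1, c2, PySem.List.pyGetD_natCast, PySem.List.pyGetD_natCast]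
    rfl
  have hsum : ∀ (n : Nat) (f : Nat → Int), ((List.range n).map f).sum = ∑ x ∈ Finset.range n, f x :=
    fun n f => rfl
  simp only [List.map_map, Function.comp_def, hterm, hsum, zero_add]
  rw [pvEntry_eq]

-- ===== VERDICT (by name: the statement is the Claim_ definition above) =====
theorem sumOfKxKMatrices_spec : Claim_equal_sumOfKxKMatrices := by
  intro arr k _ hpre
  unfold Spec_sumOfKxKMatrices
  exact pvMain arr k hpre.1
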